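-- pv_equiv track=rewrite | github.com/soumilk91/DS-Algo-In-Python | Graph/count_subIslands.py | bfs
-- ===== SOURCE A (Python) =====
-- from collections import deque
--
-- def bfs(grid1, grid2, row, col, visited):
--     queue = deque([(row, col)])
--     directions = [(0, 1), (0, -1), (1, 0), (-1, 0)]
--     visited.add((row, col))
--     is_sub_island = True
--
--     while queue:
--         currRow, currCol = queue.popleft()
--
--         if grid1[currRow][currCol] != 1:
--             is_sub_island = False
--
--         for direction in directions:
--             newRow, newCol = currRow + direction[0], currCol + direction[1]
--             if 0 <= newRow < len(grid2) and 0 <= newCol < len(grid2[0]) and grid2[newRow][newCol] == 1 and (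
--             newRow, newCol) not in visited:
--                 visited.add((newRow, newCol))
--                 queue.append((newRow, newCol))
--
--     return is_sub_island
-- ===== SOURCE B (Python) =====
-- def bfs(grid1, grid2, row, col, visited):
--     visited.add((row, col))
--     result = grid1[row][col] == 1
--     for dr, dc in ((0, 1), (0, -1), (1, 0), (-1, 0)):
--         nr, nc = row + dr, col + dc
--         if 0 <= nr < len(grid2) and 0 <= nc < len(grid2[0]) and grid2[nr][nc] == 1 and (nr, nc) not in visited:
--             result = bfs(grid1, grid2, nr, nc, visited) and result
--     return result
-- ===== Notes on version B (the rewrite author's own statement) =====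
-- stated objective: alternative
-- what changed: Replaces A's iterative FIFO-queue BFS that threads a sub-island flag through an explicit worklist loop by a recursive DFS that marks the cell, checks it against grid1, and ANDs in the result of a recursive call per open unvisited neighbour.
-- outside the precondition, e.g. on bfs([[1]], [[1, 0], [0, 1]], 0, 0, set()): A returns True, B returns True
import Mathlib
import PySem

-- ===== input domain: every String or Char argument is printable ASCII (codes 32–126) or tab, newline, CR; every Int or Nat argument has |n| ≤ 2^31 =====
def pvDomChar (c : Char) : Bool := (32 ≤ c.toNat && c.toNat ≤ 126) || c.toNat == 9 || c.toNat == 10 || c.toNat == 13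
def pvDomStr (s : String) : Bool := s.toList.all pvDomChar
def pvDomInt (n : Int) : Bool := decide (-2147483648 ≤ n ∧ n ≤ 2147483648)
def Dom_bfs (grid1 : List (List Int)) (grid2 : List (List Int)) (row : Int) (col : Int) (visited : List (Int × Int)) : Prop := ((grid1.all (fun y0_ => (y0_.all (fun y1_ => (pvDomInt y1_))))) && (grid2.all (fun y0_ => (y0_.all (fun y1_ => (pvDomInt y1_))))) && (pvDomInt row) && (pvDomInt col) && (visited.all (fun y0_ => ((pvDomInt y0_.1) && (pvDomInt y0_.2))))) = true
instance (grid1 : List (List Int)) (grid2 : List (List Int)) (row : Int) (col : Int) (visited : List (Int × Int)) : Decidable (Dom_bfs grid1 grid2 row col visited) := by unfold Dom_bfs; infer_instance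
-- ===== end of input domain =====

-- B replaces A's iterative FIFO-queue BFS (explicit queue + a sub-island flag updated per dequeued
-- cell) by a recursive DFS that returns the AND of 'grid1 == 1' over the cells it reaches (objective:
-- alternative, same cost). Both A and B mutate `visited` in place identically; the theorems below are
-- about the return value.

-- A-side helpers (literal pieces of A's loop body).
-- grid value g[r][c]; defaults to 0 exactly where Python would raise IndexError (excluded by Pre_).
def pvVal (g : List (List Int)) (r c : Int) : Int :=
  (PySem.List.pyGet? ((PySem.List.pyGet? g r).getD []) c).getD 0

def pvNbrs (p : Int × Int) : List (Int × Int) :=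
  [(p.1, p.2 + 1), (p.1, p.2 - 1), (p.1 + 1, p.2), (p.1 - 1, p.2)]

-- Python's '0 <= nr < len(grid2) and 0 <= nc < len(grid2[0]) and grid2[nr][nc] == 1'
-- (len(grid2[0]) is only reached when grid2 is nonempty; headD [] gives the same truth value)
def pvOpen (g2 : List (List Int)) (p : Int × Int) : Bool :=
  decide (0 ≤ p.1) && decide (p.1 < (g2.length : Int)) && decide (0 ≤ p.2) &&
    decide (p.2 < ((g2.headD []).length : Int)) && (pvVal g2 p.1 p.2 == 1)

-- fuel bound: every loop iteration / recursive call marks a fresh in-bounds cell or shortens the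
-- worklist, so height*width + 2 steps always suffice (proved via pvFresh below); pure totality guard.
def pvFuel (g2 : List (List Int)) : Nat := g2.length * (g2.headD []).length + 2

-- ===== PORT A =====
def bfsLoop (grid1 grid2 : List (List Int)) :
    Nat → List (Int × Int) → PySem.Set (Int × Int) → Bool → Bool
  | 0, _, _, flag => flag
  | _ + 1, [], _, flag => flag
  | f + 1, cur :: rest, vis, flag =>
    let flag' := if pvVal grid1 cur.1 cur.2 != 1 then false else flag
    let st := (pvNbrs cur).foldl
      (fun (s : PySem.Set (Int × Int) × List (Int × Int)) n =>
        if pvOpen grid2 n && !(PySem.Set.contains s.1 n)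
        then (PySem.Set.add s.1 n, s.2 ++ [n]) else s)
      (vis, rest)
    bfsLoop grid1 grid2 f st.2 st.1 flag'

def bfs (grid1 : List (List Int)) (grid2 : List (List Int)) (row : Int) (col : Int) (visited : List (Int × Int)) : Bool :=
  let vis := PySem.Set.add (PySem.Set.ofList visited) (row, col)
  bfsLoop grid1 grid2 (pvFuel grid2) [(row, col)] vis true

-- ===== PORT B =====
-- recursive DFS: mark (r,c) visited, start from 'grid1[r][c] == 1', AND in the result of a
-- recursive call for each in-bounds, grid2==1, unvisited neighbour; returns (visited', result)
def dfsGo (grid1 grid2 : List (List Int)) :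
    Nat → Int → Int → PySem.Set (Int × Int) → PySem.Set (Int × Int) × Bool
  | 0, _, _, vis => (vis, true)
  | f + 1, row, col, vis =>
    [((0 : Int), (1 : Int)), (0, -1), (1, 0), (-1, 0)].foldl
      (fun (st : PySem.Set (Int × Int) × Bool) d =>
        let nr := row + d.1
        let nc := col + d.2
        if decide (0 ≤ nr) && decide (nr < (grid2.length : Int)) && decide (0 ≤ nc) &&
            decide (nc < ((grid2.headD []).length : Int)) &&
            ((PySem.List.pyGet? ((PySem.List.pyGet? grid2 nr).getD []) nc).getD 0 == 1) &&
            !(PySem.Set.contains st.1 (nr, nc))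
        then
          let r2 := dfsGo grid1 grid2 f nr nc st.1
          (r2.1, r2.2 && st.2)
        else st)
      (PySem.Set.add vis (row, col),
       ((PySem.List.pyGet? ((PySem.List.pyGet? grid1 row).getD []) col).getD 0 == 1))

def bfs_alt (grid1 : List (List Int)) (grid2 : List (List Int)) (row : Int) (col : Int) (visited : List (Int × Int)) : Bool :=
  (dfsGo grid1 grid2 (pvFuel grid2) row col (PySem.Set.ofList visited)).2

-- ===== PRECONDITION & SPEC =====
def pvIdx2Ok (g : List (List Int)) (r c : Int) : Bool :=
  (PySem.List.pyGet? ((PySem.List.pyGet? g r).getD []) c).isSome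

-- A raises IndexError iff some processed cell fails to index grid1 or a jagged grid2 row is hit;
-- Pre_ excludes those crashes via closed-form over-approximation (so it is slightly narrower than
-- "A returns": it also excludes grids whose offending cells are merely unreachable from the start —
-- A happens to return an ordinary value there, see the cites in the claim).
def Pre_bfs (grid1 : List (List Int)) (grid2 : List (List Int)) (row : Int) (col : Int) (visited : List (Int × Int)) : Prop :=
  pvIdx2Ok grid1 row col = true ∧
  (∀ r ∈ grid2, (grid2.headD []).length ≤ r.length) ∧
  (∀ i < grid2.length, ∀ j < (grid2.headD []).length,
     pvVal grid2 (i : Int) (j : Int) = 1 → pvIdx2Ok grid1 (i : Int) (j : Int) = true)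
instance (grid1 : List (List Int)) (grid2 : List (List Int)) (row : Int) (col : Int) (visited : List (Int × Int)) : Decidable (Pre_bfs grid1 grid2 row col visited) := by unfold Pre_bfs; infer_instance

def pvWitness_bfs : List (List Int) × List (List Int) × Int × Int × (List (Int × Int)) :=
  ([[1, 1], [0, 1]], [[1, 1], [0, 1]], 0, 0, [])

def Spec_bfs (grid1 : List (List Int)) (grid2 : List (List Int)) (row : Int) (col : Int) (visited : List (Int × Int)) (out : Bool) : Prop := out = bfs_alt grid1 grid2 row col visited
instance (grid1 : List (List Int)) (grid2 : List (List Int)) (row : Int) (col : Int) (visited : List (Int × Int)) (out : Bool) : Decidable (Spec_bfs grid1 grid2 row col visited out) := by unfold Spec_bfs; infer_instance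

-- ===== CLAIM (what is proved, stated in full; the proofs are below) =====
def Claim_equal_bfs : Prop := ∀ (grid1 : List (List Int)) (grid2 : List (List Int)) (row : Int) (col : Int) (visited : List (Int × Int)), Dom_bfs grid1 grid2 row col visited → Pre_bfs grid1 grid2 row col visited → Spec_bfs grid1 grid2 row col visited (bfs grid1 grid2 row col visited)

-- ===== LEMMAS AND PROOFS =====

-- all in-bounds cells of grid2, each exactly once
def pvCells (g2 : List (List Int)) : List (Int × Int) :=
  (List.range g2.length).flatMap
    (fun i => (List.range (g2.headD []).length).map (fun j => (Int.ofNat i, Int.ofNat j)))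

-- number of in-bounds cells not yet visited (the termination-measure component)
def pvFresh (g2 : List (List Int)) (vis : List (Int × Int)) : Nat :=
  ((pvCells g2).filter (fun p => !(PySem.Set.contains vis p))).length

-- the cells a neighbour scan starting from set `vis` freshly marks, in scan order (A's inner loop)
def pvNew (g2 : List (List Int)) : List (Int × Int) → PySem.Set (Int × Int) → List (Int × Int)
  | [], _ => []
  | n :: ns, vis =>
    if pvOpen g2 n && !(PySem.Set.contains vis n)
    then n :: pvNew g2 ns (PySem.Set.add vis n) else pvNew g2 ns vis

-- the visited set after that scan
def pvVisAfter (g2 : List (List Int)) : List (Int × Int) → PySem.Set (Int × Int) → PySem.Set (Int × Int)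
  | [], vis => vis
  | n :: ns, vis =>
    if pvOpen g2 n && !(PySem.Set.contains vis n)
    then pvVisAfter g2 ns (PySem.Set.add vis n) else pvVisAfter g2 ns vis

-- cells flooded from `roots`, never stepping into `vis`
inductive pvCl (g2 : List (List Int)) (vis roots : List (Int × Int)) : (Int × Int) → Prop
  | base {p} (h : p ∈ roots) : pvCl g2 vis roots p
  | step {q n} (h : pvCl g2 vis roots q) (hn : n ∈ pvNbrs q)
      (ho : pvOpen g2 n = true) (hv : n ∉ vis) : pvCl g2 vis roots n

theorem pvCond_iff (g2 : List (List Int)) (n : Int × Int) (vis : PySem.Set (Int × Int)) :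
    (pvOpen g2 n && !(PySem.Set.contains vis n)) = true ↔ pvOpen g2 n = true ∧ n ∉ vis := by
  simp

theorem pvNew_cons (g2 : List (List Int)) (n : Int × Int) (ns : List (Int × Int))
    (vis : PySem.Set (Int × Int)) :
    pvNew g2 (n :: ns) vis =
      if pvOpen g2 n && !(PySem.Set.contains vis n)
      then n :: pvNew g2 ns (PySem.Set.add vis n) else pvNew g2 ns vis := rfl

theorem pvVisAfter_cons (g2 : List (List Int)) (n : Int × Int) (ns : List (Int × Int))
    (vis : PySem.Set (Int × Int)) :
    pvVisAfter g2 (n :: ns) vis =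
      if pvOpen g2 n && !(PySem.Set.contains vis n)
      then pvVisAfter g2 ns (PySem.Set.add vis n) else pvVisAfter g2 ns vis := rfl

theorem pvContains_false {s : List (Int × Int)} {p : Int × Int} :
    PySem.Set.contains s p = false ↔ p ∉ s := by
  rw [← Bool.not_eq_true, PySem.Set.contains_iff]

theorem pvLContains_false {s : List (Int × Int)} {p : Int × Int} :
    s.contains p = false ↔ p ∉ s := by
  rw [← Bool.not_eq_true, List.contains_iff_mem]

theorem pvFoldA_spec (g2 : List (List Int)) :
    ∀ (ns : List (Int × Int)) (vis : PySem.Set (Int × Int)) (q : List (Int × Int)),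
      ns.foldl
        (fun (s : PySem.Set (Int × Int) × List (Int × Int)) n =>
          if pvOpen g2 n && !(PySem.Set.contains s.1 n)
          then (PySem.Set.add s.1 n, s.2 ++ [n]) else s)
        (vis, q)
      = (pvVisAfter g2 ns vis, q ++ pvNew g2 ns vis) := by
  intro ns
  induction ns with
  | nil => intro vis q; simp [pvVisAfter, pvNew]
  | cons n ns ih =>
    intro vis q
    rw [List.foldl_cons, pvNew_cons, pvVisAfter_cons]
    by_cases h : (pvOpen g2 n && !(PySem.Set.contains vis n)) = true
    · rw [if_pos h]
      show List.foldl _ (PySem.Set.add vis n, q ++ [n]) ns = _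
      rw [ih, if_pos h, if_pos h, List.append_assoc]
      rfl
    · rw [if_neg h]
      show List.foldl _ (vis, q) ns = _
      rw [ih, if_neg h, if_neg h]

theorem pvMem_visAfter (g2 : List (List Int)) :
    ∀ (ns : List (Int × Int)) (vis : PySem.Set (Int × Int)) (p : Int × Int),
      p ∈ pvVisAfter g2 ns vis ↔ p ∈ vis ∨ p ∈ pvNew g2 ns vis := by
  intro ns
  induction ns with
  | nil => intro vis p; simp [pvVisAfter, pvNew]
  | cons n ns ih =>
    intro vis p
    rw [pvVisAfter_cons, pvNew_cons]
    by_cases h : (pvOpen g2 n && !(PySem.Set.contains vis n)) = true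
    · rw [if_pos h, if_pos h, ih, PySem.Set.mem_add, List.mem_cons]
      tauto
    · rw [if_neg h, if_neg h, ih]

theorem pvMem_new (g2 : List (List Int)) :
    ∀ (ns : List (Int × Int)) (vis : PySem.Set (Int × Int)) (p : Int × Int),
      p ∈ pvNew g2 ns vis ↔ p ∈ ns ∧ pvOpen g2 p = true ∧ p ∉ vis := by
  intro ns
  induction ns with
  | nil => intro vis p; simp [pvNew]
  | cons n ns ih =>
    intro vis p
    rw [pvNew_cons]
    by_cases h : (pvOpen g2 n && !(PySem.Set.contains vis n)) = true
    · obtain ⟨hop, hnv⟩ := (pvCond_iff g2 n vis).mp h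
      rw [if_pos h, List.mem_cons, ih, PySem.Set.mem_add, List.mem_cons]
      constructor
      · rintro (rfl | ⟨hm, ho, hv⟩)
        · exact ⟨Or.inl rfl, hop, hnv⟩
        · exact ⟨Or.inr hm, ho, fun hc => hv (Or.inl hc)⟩
      · rintro ⟨(rfl | hm), ho, hv⟩
        · exact Or.inl rfl
        · by_cases hpn : p = n
          · exact Or.inl hpn
          · exact Or.inr ⟨hm, ho, fun hc => hc.elim hv hpn⟩
    · have h' : ¬ (pvOpen g2 n = true ∧ n ∉ vis) := fun hc => h ((pvCond_iff g2 n vis).mpr hc)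
      rw [if_neg h, ih, List.mem_cons]
      constructor
      · rintro ⟨hm, ho, hv⟩; exact ⟨Or.inr hm, ho, hv⟩
      · rintro ⟨(rfl | hm), ho, hv⟩
        · exact absurd ⟨ho, hv⟩ h'
        · exact ⟨hm, ho, hv⟩

theorem pvNew_nodup (g2 : List (List Int)) :
    ∀ (ns : List (Int × Int)) (vis : PySem.Set (Int × Int)), (pvNew g2 ns vis).Nodup := by
  intro ns
  induction ns with
  | nil => intro vis; simp [pvNew]
  | cons n ns ih =>
    intro vis
    rw [pvNew_cons]
    by_cases h : (pvOpen g2 n && !(PySem.Set.contains vis n)) = true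
    · rw [if_pos h, List.nodup_cons]
      refine ⟨fun hc => ?_, ih _⟩
      rw [pvMem_new] at hc
      exact hc.2.2 ((PySem.Set.mem_add _ _ _).mpr (Or.inr rfl))
    · rw [if_neg h]
      exact ih _

theorem pvOpen_mem_cells (g2 : List (List Int)) (p : Int × Int)
    (h : pvOpen g2 p = true) : p ∈ pvCells g2 := by
  simp only [pvOpen, Bool.and_eq_true, decide_eq_true_eq] at h
  obtain ⟨⟨⟨⟨h1, h2⟩, h3⟩, h4⟩, -⟩ := h
  obtain ⟨a, b⟩ := p
  simp only at h1 h2 h3 h4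
  simp only [pvCells]
  have hi : a.toNat ∈ List.range g2.length := List.mem_range.mpr (by omega)
  have hj : b.toNat ∈ List.range (g2.headD []).length := List.mem_range.mpr (by omega)
  refine List.mem_flatMap.mpr ⟨a.toNat, hi, List.mem_map.mpr ⟨b.toNat, hj, ?_⟩⟩
  simp only [Prod.mk.injEq, Int.ofNat_eq_natCast]
  omega

theorem pvFresh_drop (g2 : List (List Int)) (ns : List (Int × Int)) (vis : PySem.Set (Int × Int)) :
    pvFresh g2 (pvVisAfter g2 ns vis) + (pvNew g2 ns vis).length ≤ pvFresh g2 vis := by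
  have hfilter : (pvCells g2).filter (fun p => !(PySem.Set.contains (pvVisAfter g2 ns vis) p))
      = ((pvCells g2).filter (fun p => !(PySem.Set.contains vis p))).filter
          (fun p => !((pvNew g2 ns vis).contains p)) := by
    rw [List.filter_filter]
    apply List.filter_congr
    intro p _
    rw [Bool.eq_iff_iff]
    simp only [Bool.not_eq_true', Bool.and_eq_true]
    rw [pvContains_false, pvContains_false, pvLContains_false, pvMem_visAfter]
    tauto
  have hsub : pvNew g2 ns vis ⊆
      ((pvCells g2).filter (fun p => !(PySem.Set.contains vis p))).filter
        (fun p => (pvNew g2 ns vis).contains p) := by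
    intro p hp
    obtain ⟨hmem, hop, hnv⟩ := (pvMem_new g2 ns vis p).mp hp
    rw [List.mem_filter, List.mem_filter]
    exact ⟨⟨pvOpen_mem_cells g2 p hop, by rw [Bool.not_eq_true', pvContains_false]; exact hnv⟩,
      List.contains_iff_mem.mpr hp⟩
  have hlen : (pvNew g2 ns vis).length ≤
      (((pvCells g2).filter (fun p => !(PySem.Set.contains vis p))).filter
        (fun p => (pvNew g2 ns vis).contains p)).length :=
    (List.subperm_of_subset (pvNew_nodup g2 ns vis) hsub).length_le
  have hpart : ((pvCells g2).filter (fun p => !(PySem.Set.contains vis p))).length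
      = (((pvCells g2).filter (fun p => !(PySem.Set.contains vis p))).filter
          (fun p => ((pvNew g2 ns vis).contains p))).length
        + (((pvCells g2).filter (fun p => !(PySem.Set.contains vis p))).filter
          (fun p => !((pvNew g2 ns vis).contains p))).length := by
    simpa using List.length_eq_length_filter_add
      (l := (pvCells g2).filter (fun p => !(PySem.Set.contains vis p)))
      (fun p => ((pvNew g2 ns vis).contains p))
  unfold pvFresh
  rw [hfilter]
  omega

theorem pvCl_nil (g2 : List (List Int)) (vis : List (Int × Int)) (p : Int × Int)
    (h : pvCl g2 vis [] p) : False := by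
  induction h with
  | base h => cases h
  | step _ _ _ _ ih => exact ih

theorem pvCl_mono (g2 : List (List Int)) (vis roots roots' : List (Int × Int))
    (hr : ∀ x ∈ roots, x ∈ roots') (p : Int × Int)
    (h : pvCl g2 vis roots p) : pvCl g2 vis roots' p := by
  induction h with
  | base h => exact pvCl.base (hr _ h)
  | step _ hn ho hv ih => exact pvCl.step ih hn ho hv

theorem pvCl_key (g2 : List (List Int)) (vis : PySem.Set (Int × Int))
    (c : Int × Int) (rest : List (Int × Int)) (p : Int × Int) :
    pvCl g2 vis (c :: rest) p ↔
      p = c ∨ pvCl g2 (pvVisAfter g2 (pvNbrs c) vis) (rest ++ pvNew g2 (pvNbrs c) vis) p := by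
  constructor
  · intro h
    induction h with
    | base h =>
      rcases List.mem_cons.mp h with rfl | hm
      · exact Or.inl rfl
      · exact Or.inr (pvCl.base (List.mem_append.mpr (Or.inl hm)))
    | step hq hn ho hv ih =>
      rename_i q n
      by_cases hnnew : n ∈ pvNew g2 (pvNbrs c) vis
      · exact Or.inr (pvCl.base (List.mem_append.mpr (Or.inr hnnew)))
      · rcases ih with rfl | hq'
        · exact absurd ((pvMem_new g2 _ _ _).mpr ⟨hn, ho, hv⟩) hnnew
        · refine Or.inr (pvCl.step hq' hn ho ?_)
          rw [pvMem_visAfter]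
          rintro (hx | hx)
          · exact hv hx
          · exact hnnew hx
  · rintro (rfl | h)
    · exact pvCl.base List.mem_cons_self
    · induction h with
      | base h =>
        rcases List.mem_append.mp h with hm | hm
        · exact pvCl.base (List.mem_cons_of_mem _ hm)
        · rw [pvMem_new] at hm
          exact pvCl.step (pvCl.base List.mem_cons_self) hm.1 hm.2.1 hm.2.2
      | step _ hn ho hv ih =>
        refine pvCl.step ih hn ho ?_
        intro hx
        exact hv ((pvMem_visAfter g2 _ _ _).mpr (Or.inl hx))

theorem bfsLoop_spec (g1 g2 : List (List Int)) :
    ∀ (f : Nat) (queue : List (Int × Int)) (vis : PySem.Set (Int × Int)) (flag : Bool),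
      queue.length + pvFresh g2 vis ≤ f →
      (bfsLoop g1 g2 f queue vis flag = true ↔
        (flag = true ∧ ∀ p, pvCl g2 vis queue p → (pvVal g1 p.1 p.2 == 1) = true)) := by
  intro f
  induction f with
  | zero =>
    intro queue vis flag hm
    have hq : queue = [] := by
      cases queue with
      | nil => rfl
      | cons a l => simp at hm
    subst hq
    simp only [bfsLoop]
    exact ⟨fun h => ⟨h, fun p hp => absurd hp (fun hp => pvCl_nil g2 vis p hp)⟩, fun h => h.1⟩
  | succ f ih =>
    intro queue vis flag hm
    cases queue with
    | nil =>
      simp only [bfsLoop]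
      exact ⟨fun h => ⟨h, fun p hp => absurd hp (fun hp => pvCl_nil g2 vis p hp)⟩, fun h => h.1⟩
    | cons c rest =>
      simp only [bfsLoop, pvFoldA_spec]
      have hmeas : (rest ++ pvNew g2 (pvNbrs c) vis).length
          + pvFresh g2 (pvVisAfter g2 (pvNbrs c) vis) ≤ f := by
        have := pvFresh_drop g2 (pvNbrs c) vis
        simp only [List.length_append, List.length_cons] at hm ⊢
        omega
      rw [ih _ _ _ hmeas]
      by_cases hg : (pvVal g1 c.1 c.2 != 1) = true
      · have hgc : ¬ ((pvVal g1 c.1 c.2 == 1) = true) := by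
          simpa [bne] using hg
        rw [if_pos hg]
        constructor
        · rintro ⟨h, _⟩; cases h
        · rintro ⟨_, h⟩
          exact absurd (h c (pvCl.base List.mem_cons_self)) hgc
      · have hgc : (pvVal g1 c.1 c.2 == 1) = true := by
          simpa [bne] using hg
        rw [if_neg hg]
        constructor
        · rintro ⟨hf, h⟩
          refine ⟨hf, fun p hp => ?_⟩
          rcases (pvCl_key g2 vis c rest p).mp hp with rfl | hp'
          · exact hgc
          · exact h p hp'
        · rintro ⟨hf, h⟩
          exact ⟨hf, fun p hp => h p ((pvCl_key g2 vis c rest p).mpr (Or.inr hp))⟩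

theorem pvCells_length (g2 : List (List Int)) :
    (pvCells g2).length = g2.length * (g2.headD []).length := by
  simp [pvCells, List.length_flatMap, List.map_const']

theorem pvFresh_le (g2 : List (List Int)) (vis : List (Int × Int)) :
    pvFresh g2 vis ≤ g2.length * (g2.headD []).length := by
  rw [← pvCells_length]
  exact List.length_filter_le _ _

-- ===== B-side lemmas (recursive DFS) =====

theorem pvFilterLen_mono {α : Type} (l : List α) (p q : α → Bool)
    (h : ∀ a, p a = true → q a = true) : (l.filter p).length ≤ (l.filter q).length := by
  induction l with
  | nil => simp
  | cons a l ih =>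
    by_cases hp : p a = true
    · rw [List.filter_cons_of_pos hp, List.filter_cons_of_pos (h a hp)]
      simpa using ih
    · rw [List.filter_cons_of_neg (by simpa using hp)]
      by_cases hq : q a = true
      · rw [List.filter_cons_of_pos hq]
        exact le_trans ih (by simp)
      · rw [List.filter_cons_of_neg (by simpa using hq)]
        exact ih

theorem pvFresh_mono (g2 : List (List Int)) (s t : List (Int × Int))
    (hsub : ∀ p, p ∈ s → p ∈ t) : pvFresh g2 t ≤ pvFresh g2 s := by
  unfold pvFresh
  apply pvFilterLen_mono
  intro a
  simp only [Bool.not_eq_true', pvContains_false]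
  intro hpt hps
  exact hpt (hsub a hps)

theorem pvFresh_add_lt (g2 : List (List Int)) (s : List (Int × Int)) (n : Int × Int)
    (hc : pvOpen g2 n = true) (hn : n ∉ s) :
    pvFresh g2 (PySem.Set.add s n) < pvFresh g2 s := by
  have hfilter : (pvCells g2).filter (fun p => !(PySem.Set.contains (PySem.Set.add s n) p))
      = ((pvCells g2).filter (fun p => !(PySem.Set.contains s p))).filter
          (fun p => !(p == n)) := by
    rw [List.filter_filter]
    apply List.filter_congr
    intro p _
    rw [Bool.eq_iff_iff]
    simp only [Bool.not_eq_true', Bool.and_eq_true, beq_eq_false_iff_ne, ne_eq]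
    rw [pvContains_false, pvContains_false, PySem.Set.mem_add]
    tauto
  have hmem : n ∈ (pvCells g2).filter (fun p => !(PySem.Set.contains s p)) := by
    rw [List.mem_filter]
    exact ⟨pvOpen_mem_cells g2 n hc, by rw [Bool.not_eq_true', pvContains_false]; exact hn⟩
  unfold pvFresh
  rw [hfilter]
  apply List.length_filter_lt_length_iff_exists.mpr
  exact ⟨n, hmem, by simp⟩

-- every cell derived from the single root n while avoiding `add S n` is n itself or lies outside add S n
theorem pvCl_single_out (g2 : List (List Int)) (S : List (Int × Int)) (n p : Int × Int)
    (h : pvCl g2 (PySem.Set.add S n) [n] p) : p = n ∨ p ∉ PySem.Set.add S n := by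
  induction h with
  | base h => exact Or.inl (List.mem_singleton.mp h)
  | step _ _ _ hv _ => exact Or.inr hv

theorem pvCl_avoid (g2 : List (List Int)) (V rs : List (Int × Int))
    (hr : ∀ x ∈ rs, x ∉ V) (p : Int × Int) (h : pvCl g2 V rs p) : p ∉ V := by
  induction h with
  | base h => exact hr _ h
  | step _ _ _ hv _ => exact hv

-- absorption: a root already in the closure adds nothing
theorem pvCl_absorb (g2 : List (List Int)) (V rs : List (Int × Int)) (n : Int × Int)
    (hn : pvCl g2 V rs n) (p : Int × Int) :
    pvCl g2 V (rs ++ [n]) p ↔ pvCl g2 V rs p := by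
  constructor
  · intro h
    induction h with
    | base h =>
      rcases List.mem_append.mp h with hm | hm
      · exact pvCl.base hm
      · rw [List.mem_singleton] at hm; subst hm; exact hn
    | step _ hnb ho hv ih => exact pvCl.step ih hnb ho hv
  · exact pvCl_mono g2 V rs (rs ++ [n]) (fun x hx => List.mem_append.mpr (Or.inl hx)) p

-- gluing a one-root sub-closure (avoiding the already-reached set S) into the running closure
theorem pvCl_union (g2 : List (List Int)) (vis0 S rs : List (Int × Int)) (n : Int × Int)
    (hS : ∀ p, p ∈ S ↔ p ∈ vis0 ∨ pvCl g2 vis0 rs p)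
    (hroots : ∀ x ∈ rs, x ∉ vis0)
    (hn : n ∉ S) (p : Int × Int) :
    (p ∈ S ∨ pvCl g2 (PySem.Set.add S n) [n] p) ↔ (p ∈ vis0 ∨ pvCl g2 vis0 (rs ++ [n]) p) := by
  have hvS : ∀ q, q ∈ vis0 → q ∈ S := fun q hq => (hS q).mpr (Or.inl hq)
  have hnv : n ∉ vis0 := fun hc => hn (hvS n hc)
  constructor
  · rintro (hp | hp)
    · rcases (hS p).mp hp with hv | hc
      · exact Or.inl hv
      · exact Or.inr (pvCl_mono g2 vis0 rs (rs ++ [n])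
          (fun x hx => List.mem_append.mpr (Or.inl hx)) p hc)
    · right
      induction hp with
      | base h =>
        rw [List.mem_singleton] at h; subst h
        exact pvCl.base (List.mem_append.mpr (Or.inr (List.mem_singleton.mpr rfl)))
      | step hq hnb ho hv ih =>
        rename_i q m
        have hmS : m ∉ S := fun hc => hv ((PySem.Set.mem_add _ _ _).mpr (Or.inl hc))
        have hmv : m ∉ vis0 := fun hc => hmS (hvS m hc)
        exact pvCl.step ih hnb ho hmv
  · rintro (hp | hp)
    · exact Or.inl (hvS p hp)
    · induction hp with
      | base h =>
        rcases List.mem_append.mp h with hm | hm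
        · exact Or.inl ((hS _).mpr (Or.inr (pvCl.base hm)))
        · rw [List.mem_singleton] at hm; subst hm
          exact Or.inr (pvCl.base (List.mem_singleton.mpr rfl))
      | step hq hnb ho hv ih =>
        rename_i q m
        by_cases hmS : m ∈ S
        · exact Or.inl hmS
        · rcases ih with hqS | hqC
          · rcases (hS q).mp hqS with hqv | hqc
            · exact absurd hqv (pvCl_avoid g2 vis0 (rs ++ [n])
                (by intro x hx
                    rcases List.mem_append.mp hx with h1 | h1
                    · exact hroots x h1
                    · rw [List.mem_singleton] at h1; subst h1; exact hnv) q hq)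
            · exact Or.inl ((hS m).mpr (Or.inr (pvCl.step hqc hnb ho hv)))
          · by_cases hmn : m = n
            · subst hmn
              exact Or.inr (pvCl.base (List.mem_singleton.mpr rfl))
            · refine Or.inr (pvCl.step hqC hnb ho ?_)
              rw [PySem.Set.mem_add]
              rintro (h1 | h1)
              · exact hmS h1
              · exact hmn h1

-- the closure from one root c equals {c} plus the closure from c's open unvisited neighbours
theorem pvCl_root (g2 : List (List Int)) (vis0 : List (Int × Int)) (c p : Int × Int) :
    pvCl g2 vis0 [c] p ↔
      p = c ∨ pvCl g2 vis0
        ((pvNbrs c).filter (fun n => pvOpen g2 n && !(PySem.Set.contains vis0 n))) p := by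
  constructor
  · intro h
    induction h with
    | base h => exact Or.inl (List.mem_singleton.mp h)
    | step hq hnb ho hv ih =>
      rename_i q m
      rcases ih with rfl | hc
      · refine Or.inr (pvCl.base ?_)
        rw [List.mem_filter]
        exact ⟨hnb, (pvCond_iff g2 m vis0).mpr ⟨ho, hv⟩⟩
      · exact Or.inr (pvCl.step hc hnb ho hv)
  · rintro (rfl | h)
    · exact pvCl.base (List.mem_singleton.mpr rfl)
    · induction h with
      | base h =>
        rw [List.mem_filter] at h
        obtain ⟨ho, hv⟩ := (pvCond_iff g2 _ vis0).mp h.2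
        exact pvCl.step (pvCl.base (List.mem_singleton.mpr rfl)) h.1 ho hv
      | step _ hnb ho hv ih => exact pvCl.step ih hnb ho hv

-- B's inline neighbour test is the shared pvOpen predicate
theorem pvCondB_eq (g2 : List (List Int)) (nr nc : Int) (S : PySem.Set (Int × Int)) :
    (decide (0 ≤ nr) && decide (nr < (g2.length : Int)) && decide (0 ≤ nc) &&
      decide (nc < ((g2.headD []).length : Int)) &&
      ((PySem.List.pyGet? ((PySem.List.pyGet? g2 nr).getD []) nc).getD 0 == 1) &&
      !(PySem.Set.contains S (nr, nc)))
    = (pvOpen g2 (nr, nc) && !(PySem.Set.contains S (nr, nc))) := by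
  simp [pvOpen, pvVal]

-- the invariant carried through B's fold over the four directions
theorem dfsFold_spec (g1 g2 : List (List Int)) (f : Nat) (row col : Int)
    (vis0 : PySem.Set (Int × Int)) (b0 : Bool)
    (IH : ∀ (r c : Int) (vis : PySem.Set (Int × Int)),
        pvFresh g2 (PySem.Set.add vis (r, c)) < f →
        (∀ p, p ∈ (dfsGo g1 g2 f r c vis).1 ↔
            p ∈ vis ∨ pvCl g2 (PySem.Set.add vis (r, c)) [(r, c)] p) ∧
        ((dfsGo g1 g2 f r c vis).2 = true ↔
            ∀ p, pvCl g2 (PySem.Set.add vis (r, c)) [(r, c)] p → (pvVal g1 p.1 p.2 == 1) = true)) :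
    ∀ (ds : List (Int × Int)) (S : PySem.Set (Int × Int)) (b : Bool) (rs : List (Int × Int)),
      (∀ x ∈ rs, x ∉ vis0) →
      (∀ p, p ∈ S ↔ p ∈ vis0 ∨ pvCl g2 vis0 rs p) →
      (b = true ↔ (b0 = true ∧ ∀ p, pvCl g2 vis0 rs p → (pvVal g1 p.1 p.2 == 1) = true)) →
      pvFresh g2 S ≤ f →
      (∀ p, p ∈ (ds.foldl
          (fun (st : PySem.Set (Int × Int) × Bool) d =>
            let nr := row + d.1
            let nc := col + d.2
            if decide (0 ≤ nr) && decide (nr < (g2.length : Int)) && decide (0 ≤ nc) &&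
                decide (nc < ((g2.headD []).length : Int)) &&
                ((PySem.List.pyGet? ((PySem.List.pyGet? g2 nr).getD []) nc).getD 0 == 1) &&
                !(PySem.Set.contains st.1 (nr, nc))
            then
              let r2 := dfsGo g1 g2 f nr nc st.1
              (r2.1, r2.2 && st.2)
            else st)
          (S, b)).1 ↔
        p ∈ vis0 ∨ pvCl g2 vis0
          (rs ++ (ds.map (fun d => (row + d.1, col + d.2))).filter
            (fun n => pvOpen g2 n && !(PySem.Set.contains vis0 n))) p) ∧
      ((ds.foldl
          (fun (st : PySem.Set (Int × Int) × Bool) d =>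
            let nr := row + d.1
            let nc := col + d.2
            if decide (0 ≤ nr) && decide (nr < (g2.length : Int)) && decide (0 ≤ nc) &&
                decide (nc < ((g2.headD []).length : Int)) &&
                ((PySem.List.pyGet? ((PySem.List.pyGet? g2 nr).getD []) nc).getD 0 == 1) &&
                !(PySem.Set.contains st.1 (nr, nc))
            then
              let r2 := dfsGo g1 g2 f nr nc st.1
              (r2.1, r2.2 && st.2)
            else st)
          (S, b)).2 = true ↔
        (b0 = true ∧ ∀ p, pvCl g2 vis0
          (rs ++ (ds.map (fun d => (row + d.1, col + d.2))).filter
            (fun n => pvOpen g2 n && !(PySem.Set.contains vis0 n))) p →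
          (pvVal g1 p.1 p.2 == 1) = true)) := by
  intro ds
  induction ds with
  | nil =>
    intro S b rs hroots hS hb hf
    constructor
    · intro p
      simpa using hS p
    · simpa using hb
  | cons d ds ihds =>
    intro S b rs hroots hS hb hf
    rw [List.foldl_cons]
    dsimp only
    rw [pvCondB_eq g2 (row + d.1) (col + d.2) S]
    have hvS : ∀ q, q ∈ vis0 → q ∈ S := fun q hq => (hS q).mpr (Or.inl hq)
    by_cases hC : (pvOpen g2 (row + d.1, col + d.2)
        && !(PySem.Set.contains S (row + d.1, col + d.2))) = true
    · -- n is open and not yet reached: recurse from n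
      obtain ⟨hop, hnS⟩ := (pvCond_iff g2 _ S).mp hC
      have hnv0 : (row + d.1, col + d.2) ∉ vis0 := fun hc => hnS (hvS _ hc)
      have hD : (pvOpen g2 (row + d.1, col + d.2)
          && !(PySem.Set.contains vis0 (row + d.1, col + d.2))) = true :=
        (pvCond_iff g2 _ vis0).mpr ⟨hop, hnv0⟩
      have hrw : rs ++ (((d :: ds).map (fun d => (row + d.1, col + d.2))).filter
            (fun n => pvOpen g2 n && !(PySem.Set.contains vis0 n)))
          = (rs ++ [(row + d.1, col + d.2)])
            ++ ((ds.map (fun d => (row + d.1, col + d.2))).filter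
              (fun n => pvOpen g2 n && !(PySem.Set.contains vis0 n))) := by
        rw [List.map_cons, List.filter_cons, if_pos hD, List.append_cons]
      rw [if_pos hC, hrw]
      have hfr : pvFresh g2 (PySem.Set.add S (row + d.1, col + d.2)) < f :=
        lt_of_lt_of_le (pvFresh_add_lt g2 S _ hop hnS) hf
      obtain ⟨hr1, hr2⟩ := IH (row + d.1) (col + d.2) S hfr
      have hglue := pvCl_union g2 vis0 S rs (row + d.1, col + d.2) hS hroots hnS
      have hroots' : ∀ x ∈ rs ++ [(row + d.1, col + d.2)], x ∉ vis0 := by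
        intro x hx
        rcases List.mem_append.mp hx with h1 | h1
        · exact hroots x h1
        · rw [List.mem_singleton] at h1; subst h1; exact hnv0
      have hS2 : ∀ p, p ∈ (dfsGo g1 g2 f (row + d.1) (col + d.2) S).1 ↔
          p ∈ vis0 ∨ pvCl g2 vis0 (rs ++ [(row + d.1, col + d.2)]) p := by
        intro p
        rw [hr1 p, hglue p]
      have hsub2 : ∀ p, p ∈ PySem.Set.add S (row + d.1, col + d.2) →
          p ∈ (dfsGo g1 g2 f (row + d.1) (col + d.2) S).1 := by
        intro p hp
        rcases (PySem.Set.mem_add _ _ _).mp hp with h1 | h1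
        · exact (hr1 p).mpr (Or.inl h1)
        · rw [h1]
          exact (hr1 _).mpr (Or.inr (pvCl.base (List.mem_singleton.mpr rfl)))
      have hf2 : pvFresh g2 (dfsGo g1 g2 f (row + d.1) (col + d.2) S).1 ≤ f :=
        le_of_lt (lt_of_le_of_lt (pvFresh_mono g2 _ _ hsub2) hfr)
      have hb2 : ((dfsGo g1 g2 f (row + d.1) (col + d.2) S).2 && b) = true ↔
          (b0 = true ∧ ∀ p, pvCl g2 vis0 (rs ++ [(row + d.1, col + d.2)]) p →
            (pvVal g1 p.1 p.2 == 1) = true) := by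
        rw [Bool.and_eq_true, hr2, hb]
        constructor
        · rintro ⟨hL, hb0, hrs⟩
          refine ⟨hb0, fun p hp => ?_⟩
          rcases (hglue p).mpr (Or.inr hp) with h1 | h1
          · rcases (hS p).mp h1 with h2 | h2
            · exact absurd h2 (pvCl_avoid g2 vis0 _ hroots' p hp)
            · exact hrs p h2
          · exact hL p h1
        · rintro ⟨hb0, hall⟩
          refine ⟨fun p hp => ?_, hb0, fun p hp => ?_⟩
          · rcases (hglue p).mp (Or.inr hp) with h1 | h1
            · rcases pvCl_single_out g2 S _ p hp with rfl | h2
              · exact absurd h1 hnv0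
              · exact absurd ((PySem.Set.mem_add _ _ _).mpr (Or.inl (hvS p h1))) h2
            · exact hall p h1
          · exact hall p (pvCl_mono g2 vis0 rs _
              (fun x hx => List.mem_append.mpr (Or.inl hx)) p hp)
      exact ihds _ _ _ hroots' hS2 hb2 hf2
    · -- n is skipped (closed, already visited, or already reached)
      rw [if_neg hC]
      by_cases hD : (pvOpen g2 (row + d.1, col + d.2)
          && !(PySem.Set.contains vis0 (row + d.1, col + d.2))) = true
      · -- n open and outside vis0, but already in S: it is already in the closure of rs
        obtain ⟨hop, hnv0⟩ := (pvCond_iff g2 _ vis0).mp hD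
        have hnS : (row + d.1, col + d.2) ∈ S := by
          by_contra hns
          exact hC ((pvCond_iff g2 _ S).mpr ⟨hop, hns⟩)
        have hCl : pvCl g2 vis0 rs (row + d.1, col + d.2) := by
          rcases (hS _).mp hnS with h1 | h1
          · exact absurd h1 hnv0
          · exact h1
        have habs := pvCl_absorb g2 vis0 rs (row + d.1, col + d.2) hCl
        have hrw : rs ++ (((d :: ds).map (fun d => (row + d.1, col + d.2))).filter
              (fun n => pvOpen g2 n && !(PySem.Set.contains vis0 n)))
            = (rs ++ [(row + d.1, col + d.2)])
              ++ ((ds.map (fun d => (row + d.1, col + d.2))).filter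
                (fun n => pvOpen g2 n && !(PySem.Set.contains vis0 n))) := by
          rw [List.map_cons, List.filter_cons, if_pos hD, List.append_cons]
        rw [hrw]
        have hroots' : ∀ x ∈ rs ++ [(row + d.1, col + d.2)], x ∉ vis0 := by
          intro x hx
          rcases List.mem_append.mp hx with h1 | h1
          · exact hroots x h1
          · rw [List.mem_singleton] at h1; subst h1; exact hnv0
        have hS' : ∀ p, p ∈ S ↔ p ∈ vis0 ∨
            pvCl g2 vis0 (rs ++ [(row + d.1, col + d.2)]) p := by
          intro p
          rw [hS p, habs p]
        have hb' : b = true ↔ (b0 = true ∧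
            ∀ p, pvCl g2 vis0 (rs ++ [(row + d.1, col + d.2)]) p →
              (pvVal g1 p.1 p.2 == 1) = true) := by
          rw [hb]
          constructor
          · rintro ⟨hb0, hall⟩
            exact ⟨hb0, fun p hp => hall p ((habs p).mp hp)⟩
          · rintro ⟨hb0, hall⟩
            exact ⟨hb0, fun p hp => hall p ((habs p).mpr hp)⟩
        exact ihds _ _ _ hroots' hS' hb' hf
      · -- n contributes nothing
        have hrw : rs ++ (((d :: ds).map (fun d => (row + d.1, col + d.2))).filter
              (fun n => pvOpen g2 n && !(PySem.Set.contains vis0 n)))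
            = rs ++ ((ds.map (fun d => (row + d.1, col + d.2))).filter
                (fun n => pvOpen g2 n && !(PySem.Set.contains vis0 n))) := by
          rw [List.map_cons, List.filter_cons, if_neg hD]
        rw [hrw]
        exact ihds _ _ _ hroots hS hb hf

theorem dfsGo_spec (g1 g2 : List (List Int)) :
    ∀ (f : Nat) (r c : Int) (vis : PySem.Set (Int × Int)),
      pvFresh g2 (PySem.Set.add vis (r, c)) < f →
      (∀ p, p ∈ (dfsGo g1 g2 f r c vis).1 ↔
          p ∈ vis ∨ pvCl g2 (PySem.Set.add vis (r, c)) [(r, c)] p) ∧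
      ((dfsGo g1 g2 f r c vis).2 = true ↔
          ∀ p, pvCl g2 (PySem.Set.add vis (r, c)) [(r, c)] p → (pvVal g1 p.1 p.2 == 1) = true) := by
  intro f
  induction f with
  | zero =>
    intro r c vis hfuel
    exact absurd hfuel (Nat.not_lt_zero _)
  | succ f ih =>
    intro r c vis hfuel
    have hfold := dfsFold_spec g1 g2 f r c (PySem.Set.add vis (r, c)) (pvVal g1 r c == 1) ih
      [((0 : Int), (1 : Int)), (0, -1), (1, 0), (-1, 0)]
      (PySem.Set.add vis (r, c)) (pvVal g1 r c == 1) []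
      (by intro x hx; cases hx)
      (by intro p
          constructor
          · exact Or.inl
          · rintro (h | h)
            · exact h
            · exact absurd h (fun h => pvCl_nil g2 _ p h))
      (by constructor
          · intro h
            exact ⟨h, fun p hp => absurd hp (fun hp => pvCl_nil g2 _ p hp)⟩
          · exact fun h => h.1)
      (Nat.lt_succ_iff.mp hfuel)
    have hmap : ([((0 : Int), (1 : Int)), (0, -1), (1, 0), (-1, 0)].map
          (fun d => (r + d.1, c + d.2))).filter
          (fun n => pvOpen g2 n && !(PySem.Set.contains (PySem.Set.add vis (r, c)) n))
        = (pvNbrs (r, c)).filter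
          (fun n => pvOpen g2 n && !(PySem.Set.contains (PySem.Set.add vis (r, c)) n)) := by
      simp [pvNbrs, sub_eq_add_neg]
    rw [hmap] at hfold
    simp only [List.nil_append] at hfold
    obtain ⟨hm, hb⟩ := hfold
    have hroot := pvCl_root g2 (PySem.Set.add vis (r, c)) (r, c)
    constructor
    · intro p
      show p ∈ (dfsGo g1 g2 (f + 1) r c vis).1 ↔ _
      have : (dfsGo g1 g2 (f + 1) r c vis).1 = _ := rfl
      rw [show (dfsGo g1 g2 (f + 1) r c vis) =
          ([((0 : Int), (1 : Int)), (0, -1), (1, 0), (-1, 0)].foldl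
            (fun (st : PySem.Set (Int × Int) × Bool) d =>
              let nr := r + d.1
              let nc := c + d.2
              if decide (0 ≤ nr) && decide (nr < (g2.length : Int)) && decide (0 ≤ nc) &&
                  decide (nc < ((g2.headD []).length : Int)) &&
                  ((PySem.List.pyGet? ((PySem.List.pyGet? g2 nr).getD []) nc).getD 0 == 1) &&
                  !(PySem.Set.contains st.1 (nr, nc))
              then
                let r2 := dfsGo g1 g2 f nr nc st.1
                (r2.1, r2.2 && st.2)
              else st)
            (PySem.Set.add vis (r, c), (pvVal g1 r c == 1))) from rfl]
      rw [hm p, hroot p]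
      rw [PySem.Set.mem_add]
      tauto
    · rw [show (dfsGo g1 g2 (f + 1) r c vis) =
          ([((0 : Int), (1 : Int)), (0, -1), (1, 0), (-1, 0)].foldl
            (fun (st : PySem.Set (Int × Int) × Bool) d =>
              let nr := r + d.1
              let nc := c + d.2
              if decide (0 ≤ nr) && decide (nr < (g2.length : Int)) && decide (0 ≤ nc) &&
                  decide (nc < ((g2.headD []).length : Int)) &&
                  ((PySem.List.pyGet? ((PySem.List.pyGet? g2 nr).getD []) nc).getD 0 == 1) &&
                  !(PySem.Set.contains st.1 (nr, nc))
              then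
                let r2 := dfsGo g1 g2 f nr nc st.1
                (r2.1, r2.2 && st.2)
              else st)
            (PySem.Set.add vis (r, c), (pvVal g1 r c == 1))) from rfl]
      rw [hb]
      constructor
      · rintro ⟨hb0, hall⟩ p hp
        rcases (hroot p).mp hp with rfl | hc
        · exact hb0
        · exact hall p hc
      · intro hall
        exact ⟨hall (r, c) (pvCl.base (List.mem_singleton.mpr rfl)),
          fun p hp => hall p ((hroot p).mpr (Or.inr hp))⟩

-- ===== VERDICT (by name: the statement is the Claim_ definition above) =====
theorem bfs_spec : Claim_equal_bfs := by
  intro g1 g2 row col visited _ _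
  unfold Spec_bfs bfs bfs_alt
  have hfuel : pvFresh g2 (PySem.Set.add (PySem.Set.ofList visited) (row, col)) < pvFuel g2 := by
    have := pvFresh_le g2 (PySem.Set.add (PySem.Set.ofList visited) (row, col))
    unfold pvFuel
    omega
  have hA := bfsLoop_spec g1 g2 (pvFuel g2) [(row, col)]
    (PySem.Set.add (PySem.Set.ofList visited) (row, col)) true
    (by simp only [List.length_cons, List.length_nil]; omega)
  have hB := (dfsGo_spec g1 g2 (pvFuel g2) row col (PySem.Set.ofList visited) hfuel).2
  rw [Bool.eq_iff_iff, hA, hB]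
  tauto
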